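-- pv_equiv track=rewrite | github.com/abbasmoosajee07/AlgoVault | i18n/13/i18nDay13.py | find_match_words
-- ===== SOURCE A (Python) =====
-- def find_match_words(word_space: str, test_word: str) -> bool:
--     """Checks if a test word matches a word space with letter constraints.
--        Matching is case-insensitive but accent-sensitive.
--     """
--     if len(word_space) != len(test_word):
--         return False
--
--     constraints = {pos: letter for pos, letter in enumerate(word_space) if letter != '.'}
--
--     # If no constraints, return False immediately
--     if not constraints:
--         return False
--
--     # Convert test_word to lowercase only once
--     test_word_lower = test_word.lower()
--
--     # Check constraints efficiently
--     return all(test_word_lower[pos] == letter for pos, letter in constraints.items())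
-- ===== SOURCE B (Python) =====
-- def find_match_words(word_space: str, test_word: str) -> bool:
--     """Single-pass check: no intermediate constraints dict; a flag records
--        whether any constrained position exists."""
--     if len(word_space) != len(test_word):
--         return False
--     test_word_lower = test_word.lower()
--     has_constraint = False
--     for pos in range(len(word_space)):
--         letter = word_space[pos]
--         if letter != '.':
--             has_constraint = True
--             if test_word_lower[pos] != letter:
--                 return False
--     return has_constraint
-- ===== Notes on version B (the rewrite author's own statement) =====
-- stated objective: faster
-- what changed: Replaces the enumerate-to-dict build followed by an all() pass over the dict with a single indexed scan that keeps a has-constraint flag and fails fast on the first mismatch, allocating no intermediate dict.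
import Mathlib
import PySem

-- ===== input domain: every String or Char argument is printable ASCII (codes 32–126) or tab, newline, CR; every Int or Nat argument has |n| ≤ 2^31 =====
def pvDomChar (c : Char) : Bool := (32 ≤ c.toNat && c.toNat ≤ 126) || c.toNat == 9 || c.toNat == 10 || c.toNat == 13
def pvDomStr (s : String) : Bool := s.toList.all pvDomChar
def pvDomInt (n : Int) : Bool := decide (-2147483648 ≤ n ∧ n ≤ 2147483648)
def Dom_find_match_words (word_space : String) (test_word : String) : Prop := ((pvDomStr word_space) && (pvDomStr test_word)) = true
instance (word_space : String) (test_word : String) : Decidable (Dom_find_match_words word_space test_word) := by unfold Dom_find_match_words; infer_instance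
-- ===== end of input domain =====

-- B replaces A's constraints-dict build + all() pass by a single indexed scan with a has-constraint flag (objective: simpler).


-- ===== PORT A =====
def find_match_words (word_space : String) (test_word : String) : Bool :=
  if PySem.Str.len word_space ≠ PySem.Str.len test_word then false
  else
    let constraints := (PySem.List.enumerate word_space.toList 0).filter (fun p => p.2 != '.')
    if constraints.isEmpty then false
    else
      let test_word_lower := PySem.Str.lower test_word
      constraints.all (fun p => PySem.Str.pyGet? test_word_lower p.1 == some p.2)

-- ===== PORT B =====
-- the for-loop of Source B: scan the remaining characters of word_space, pos is the current index,
-- flag is has_constraint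
def fmwGo (rest : List Char) (tlow : List Char) (pos : Int) (flag : Bool) : Bool :=
  match rest with
  | [] => flag
  | c :: rs =>
    if c == '.' then fmwGo rs tlow (pos + 1) flag
    else if PySem.List.pyGet? tlow pos == some c then fmwGo rs tlow (pos + 1) true
    else false

def find_match_words_alt (word_space : String) (test_word : String) : Bool :=
  if PySem.Str.len word_space ≠ PySem.Str.len test_word then false
  else
    let test_word_lower := PySem.Str.lower test_word
    fmwGo word_space.toList test_word_lower.toList 0 false

-- ===== PRECONDITION & SPEC =====
def Spec_find_match_words (word_space : String) (test_word : String) (out : Bool) : Prop := out = find_match_words_alt word_space test_word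
instance (word_space : String) (test_word : String) (out : Bool) : Decidable (Spec_find_match_words word_space test_word out) := by unfold Spec_find_match_words; infer_instance

-- ===== CLAIM (what is proved, stated in full; the proofs are below) =====
def Claim_equal_find_match_words : Prop := ∀ (word_space : String) (test_word : String), Dom_find_match_words word_space test_word → Spec_find_match_words word_space test_word (find_match_words word_space test_word)

-- ===== LEMMAS AND PROOFS =====

-- loop invariant: the flag-scan equals "some constraint seen (or flag) AND all constraints hold"
theorem fmwGo_eq (l tl : List Char) : ∀ (s : Int) (flag : Bool),
    fmwGo l tl s flag =
      ((flag || !((PySem.List.enumerate l s).filter (fun p => p.2 != '.')).isEmpty)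
        && ((PySem.List.enumerate l s).filter (fun p => p.2 != '.')).all
             (fun p => PySem.List.pyGet? tl p.1 == some p.2)) := by
  induction l with
  | nil => intro s flag; simp [fmwGo, PySem.List.enumerate_nil]
  | cons c rs ih =>
    intro s flag
    by_cases hc : c = '.'
    · simp [fmwGo, hc, PySem.List.enumerate_cons, ih]
    · have hc' : (c != '.') = true := by simp [hc]
      by_cases hg : PySem.List.pyGet? tl s = some c
      · simp [fmwGo, hc, PySem.List.enumerate_cons, hc', hg, ih]
      · simp [fmwGo, hc, PySem.List.enumerate_cons, hc', hg]

-- ===== VERDICT (by name: the statement is the Claim_ definition above) =====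
theorem find_match_words_spec : Claim_equal_find_match_words := by
  intro ws tw _
  unfold Spec_find_match_words find_match_words find_match_words_alt
  by_cases hlen : PySem.Str.len ws ≠ PySem.Str.len tw
  · have h : ws.length ≠ tw.length := by
      simpa [PySem.Str.len] using hlen
    simp [h]
  · simp only [hlen, ite_false]
    rw [fmwGo_eq]
    simp [PySem.Str.pyGet?_eq, PySem.Chars.pyGet?_eq_listPyGet?, Bool.false_or]
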